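-- pv_equiv track=rewrite | github.com/CmrxRecon/CMRx4DFlow2026 | CMRx4DFlowReconDemo/FlowVN/networks/flowvn_mp.py | _balanced_stage_ranges
-- ===== SOURCE A (Python) =====
-- from typing import Optional, List, Sequence, Dict, Tuple, Union
--
-- def _balanced_stage_ranges(num_stages: int, num_devices: int) -> List[Tuple[int, int]]:
--     """
--     Return ranges [start, end) for each device, balanced as evenly as possible.
--     Example: num_stages=10, num_devices=3 -> [(0,4),(4,7),(7,10)]
--     """
--     if num_devices <= 0:
--         raise ValueError("num_devices must be >= 1")
--     if num_stages <= 0: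
--         raise ValueError("num_stages must be >= 1")
--     if num_devices > num_stages:
--         raise ValueError(f"num_devices cannot exceed num_stages. got {num_devices} > {num_stages}")
--
--     q, r = divmod(num_stages, num_devices)  # base, remainder
--     ranges: List[Tuple[int, int]] = []
--     start = 0
--     for di in range(num_devices):
--         n = q + (1 if di < r else 0)
--         end = start + n
--         ranges.append((start, end))
--         start = end
--     return ranges
-- ===== SOURCE B (Python) =====
-- def _balanced_stage_ranges(num_stages, num_devices):
--     if num_devices <= 0:
--         raise ValueError("num_devices must be >= 1")
--     if num_stages <= 0:
--         raise ValueError("num_stages must be >= 1")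
--     if num_devices > num_stages:
--         raise ValueError(f"num_devices cannot exceed num_stages. got {num_devices} > {num_stages}")
--     q, r = divmod(num_stages, num_devices)
--     return [(di * q + min(di, r), (di + 1) * q + min(di + 1, r))
--             for di in range(num_devices)]
-- ===== Notes on version B (the rewrite author's own statement) =====
-- stated objective: simpler
-- what changed: Replaced the running start/end accumulator loop with a list comprehension computing each device's range in closed form from its index (start = di*q + min(di, r)).
import Mathlib
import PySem

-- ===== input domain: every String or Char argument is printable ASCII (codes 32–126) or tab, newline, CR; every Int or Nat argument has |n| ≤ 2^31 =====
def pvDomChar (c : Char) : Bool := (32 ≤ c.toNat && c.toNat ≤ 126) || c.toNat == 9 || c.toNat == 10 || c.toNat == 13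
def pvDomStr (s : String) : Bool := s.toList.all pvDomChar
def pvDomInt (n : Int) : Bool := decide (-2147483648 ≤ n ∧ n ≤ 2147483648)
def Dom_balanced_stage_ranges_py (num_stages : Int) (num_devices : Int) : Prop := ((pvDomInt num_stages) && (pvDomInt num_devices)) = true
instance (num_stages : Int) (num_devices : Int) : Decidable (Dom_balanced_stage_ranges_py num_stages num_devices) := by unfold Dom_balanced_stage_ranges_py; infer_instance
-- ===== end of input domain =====

-- B replaces A's running start/end accumulator with a closed-form per-index comprehension; objective: simpler.

-- ===== PORT A =====
-- the three guard clauses raise ValueError in Python; those inputs are excluded by Pre_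
def balanced_stage_ranges_py (num_stages : Int) (num_devices : Int) : List (Int × Int) :=
  if num_devices ≤ 0 then []
  else if num_stages ≤ 0 then []
  else if num_devices > num_stages then []
  else
    let q := PySem.Int.floordiv num_stages num_devices
    let r := PySem.Int.mod num_stages num_devices
    ((PySem.List.pyRange 0 num_devices 1).foldl
      (fun (st : List (Int × Int) × Int) di =>
        let n := q + (if di < r then 1 else 0)
        let e := st.2 + n
        (st.1 ++ [(st.2, e)], e)) ([], 0)).1

-- ===== PORT B =====
def balanced_stage_ranges_py_alt (num_stages : Int) (num_devices : Int) : List (Int × Int) :=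
  if num_devices ≤ 0 then []
  else if num_stages ≤ 0 then []
  else if num_devices > num_stages then []
  else
    let q := PySem.Int.floordiv num_stages num_devices
    let r := PySem.Int.mod num_stages num_devices
    (PySem.List.pyRange 0 num_devices 1).map
      (fun di => (di * q + min di r, (di + 1) * q + min (di + 1) r))

-- ===== PRECONDITION & SPEC =====
-- Pre_ excludes exactly the inputs on which A raises ValueError (its three guard clauses).
def Pre_balanced_stage_ranges_py (num_stages : Int) (num_devices : Int) : Prop :=
  0 < num_devices ∧ 0 < num_stages ∧ num_devices ≤ num_stages
instance (num_stages : Int) (num_devices : Int) : Decidable (Pre_balanced_stage_ranges_py num_stages num_devices) := by unfold Pre_balanced_stage_ranges_py; infer_instance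
def pvWitness_balanced_stage_ranges_py : Int × Int := (10, 3)

def Spec_balanced_stage_ranges_py (num_stages : Int) (num_devices : Int) (out : List (Int × Int)) : Prop := out = balanced_stage_ranges_py_alt num_stages num_devices
instance (num_stages : Int) (num_devices : Int) (out : List (Int × Int)) : Decidable (Spec_balanced_stage_ranges_py num_stages num_devices out) := by unfold Spec_balanced_stage_ranges_py; infer_instance

-- ===== CLAIM =====
def Claim_equal_balanced_stage_ranges_py : Prop := ∀ (num_stages : Int) (num_devices : Int), Dom_balanced_stage_ranges_py num_stages num_devices → Pre_balanced_stage_ranges_py num_stages num_devices → Spec_balanced_stage_ranges_py num_stages num_devices (balanced_stage_ranges_py num_stages num_devices)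

-- ===== LEMMAS AND PROOFS =====

-- Loop invariant: after the first n iterations the accumulator's list is the map
-- of the closed form over the processed prefix and its start is n*q + min n r.
theorem pv_loop_closed (q r : Int) (hr : 0 ≤ r) (n : Nat) :
    ((PySem.List.pyRange 0 (n : Int) 1).foldl
      (fun (st : List (Int × Int) × Int) di =>
        let nn := q + (if di < r then 1 else 0)
        let e := st.2 + nn
        (st.1 ++ [(st.2, e)], e)) ([], 0))
    = ((PySem.List.pyRange 0 (n : Int) 1).map
        (fun di => (di * q + min di r, (di + 1) * q + min (di + 1) r)),
       (n : Int) * q + min (n : Int) r) := by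
  induction n with
  | zero => simp [PySem.List.pyRange_one_eq_nil]; omega
  | succ m ih =>
    have h : ((m : Int) + 1) = ((m + 1 : Nat) : Int) := by push_cast; ring
    rw [← h, PySem.List.pyRange_one_succ_right (by positivity)]
    simp only [List.foldl_append, List.map_append, ih, List.foldl_cons, List.foldl_nil,
      List.map_cons, List.map_nil, Prod.mk.injEq, List.append_cancel_left_eq, List.cons.injEq,
      and_true]
    by_cases hm : (m : Int) < r <;> simp [hm] <;> ring_nf <;> omega

-- ===== VERDICT =====
theorem balanced_stage_ranges_py_spec : Claim_equal_balanced_stage_ranges_py := by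
  intro ns nd _ hpre
  obtain ⟨h1, h2, h3⟩ := hpre
  unfold Spec_balanced_stage_ranges_py balanced_stage_ranges_py balanced_stage_ranges_py_alt
  rw [if_neg (by omega), if_neg (by omega), if_neg (by omega),
      if_neg (by omega), if_neg (by omega), if_neg (by omega)]
  have hr : 0 ≤ PySem.Int.mod ns nd := by
    rw [PySem.Int.mod_eq_emod_of_pos h1]; exact Int.emod_nonneg ns (by omega)
  have hnd : nd = ((nd.toNat : Nat) : Int) := (Int.toNat_of_nonneg (le_of_lt h1)).symm
  dsimp only
  rw [hnd, pv_loop_closed _ _ (hnd ▸ hr)]
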